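-- pv_equiv track=rewrite | github.com/Trinath12/Nine-men-s-morris | ABOpeningImproved.py | n2pcW
-- ===== SOURCE A (Python) =====
-- def closeMill(j, b):
--     c=b[j]
--     if(c=='W' or c=='B'):
--         if (j==0):#a0
--             if (b[2]==c and b[4]==c): return True#a0,b1,c2
--             else: return False
--         if (j==1):#g0
--             if ((b[3]==c and b[5]==c) or (b[8]==c and b[17]==c)):return True #g0,f1,e2 or g0,g3,g6
--             else: return False
--         if (j==2):#b1
--             if (b[4]==c and b[0]==c): return True#a0,b1,c2
--             else: return False
--         if (j==3):#f1
--             if ((b[1]==c and b[5]==c) or (b[7]==c and b[14]==c)): return True#g0,f1,e2 or f1,f3,f5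
--             else: return False
--         if (j==4):#c2
--             if (b[2]==c and b[0]==c): return True#a0,b1,c2
--             else: return False
--         if (j==5):#e2
--             if ((b[1]==c and b[3]==c) or (b[6]==c and b[11]==c)): return True#g0,f1,e2 or e2,e3,e4
--             else: return False
--         if (j==6):#e3
--             if ((b[7]==c and b[8]==c) or (b[5]==c and b[11]==c)): return True#e3,f3,g3 or e2,e3,e4
--             else: return False
--         if (j==7):#f3
--             if ((b[6]==c and b[8]==c) or (b[3]==c and b[14]==c)): return True#e3,f3,g3 or f1,f3,f5
--             else: return False
--         if (j==8):#g3
--             if ((b[6]==c and b[7]==c) or (b[1]==c and b[17]==c)): return True#e3,f3,g3 or g0,g3,g6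
--             else: return False
--         if (j==9):#c4
--             if ((b[12]==c and b[15]==c) or (b[10]==c and b[11]==c)): return True#c4,b5,a6 or c4,d4,e4
--             else: return False
--         if (j==10):#d4
--             if ((b[13]==c and b[16]==c) or (b[9]==c and b[11]==c)): return True#d4,d5,d6 or c4,d4,e4
--             else: return False
--         if (j==11):#e4
--             if ((b[14]==c and b[17]==c) or (b[9]==c and b[10]==c) or (b[5]==c and b[6]==c)): return True#e4,f5,g6 or c4,d4,e4 or e2,e3,e4
--             else: return False
--         if (j==12):#b5
--             if ((b[9]==c and b[15]==c) or (b[13]==c and b[14]==c)): return True#c4,b5,a6 or b5,d5,f5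
--             else: return False
--         if (j==13):#d5
--             if ((b[10]==c and b[16]==c) or (b[12]==c and b[14]==c)): return True#d4,d5,d6 or b5,d5,f5
--             else: return False
--         if (j==14):#f5
--             if ((b[11]==c and b[17]==c) or (b[13]==c and b[12]==c) or (b[3]==c and b[7]==c)): return True#b5,d5,f5 or e4,f5,g6 or f1,f3,f5
--             else: return False
--         if (j==15):#a6
--             if ((b[12]==c and b[9]==c) or (b[16]==c and b[17]==c)): return True#a6,b5,c4 or a6,d6,g6
--             else: return False
--         if (j==16):#d6
--             if ((b[10]==c and b[13]==c) or (b[15]==c and b[17]==c)): return True#a6,d6,g6 or d4,d5,d6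
--             else: return False
--         if (j==17):#g6
--             if ((b[11]==c and b[14]==c) or (b[15]==c and b[16]==c) or (b[1]==c and b[8]==c)): return True#e4,f5,g6 or a6,d6,g6 or g0,g3,g6
--             else: return False
--     else:
--         return False
--
-- def n2pcW(b):
--     cnt=0
--     for i in range(0,len(b)):
--         if (b[i]=='x'):
--             b1=b
--             #b1[i]='W'
--             temp=list(b1)
--             temp[i]='W'
--             b1="".join(temp)
--             if closeMill(i, b1):
--                 cnt+=1
--     return cnt
-- ===== SOURCE B (Python) =====
-- MILLS = [(0, 2, 4), (1, 3, 5), (1, 8, 17), (3, 7, 14), (5, 6, 11), (6, 7, 8),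
--          (9, 12, 15), (9, 10, 11), (10, 13, 16), (12, 13, 14), (11, 14, 17),
--          (15, 16, 17)]
--
-- OTHERS = {}
-- for _u, _v, _w in MILLS:
--     OTHERS.setdefault(_u, []).append((_v, _w))
--     OTHERS.setdefault(_v, []).append((_u, _w))
--     OTHERS.setdefault(_w, []).append((_u, _v))
--
--
-- def n2pcW(b):
--     cnt = 0
--     for i in range(len(b)):
--         if b[i] == 'x' and any(b[p] == 'W' and b[q] == 'W'
--                                for p, q in OTHERS.get(i, ())):
--             cnt += 1
--     return cnt
-- ===== Notes on version B (the rewrite author's own statement) =====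
-- stated objective: simpler
-- what changed: Replaces closeMill's 18-branch positional dispatch plus the per-cell list/join board rebuild with one precomputed mill-partner table: for each empty cell, check whether any mill through it has its two other cells already white.
-- outside the precondition, e.g. on n2pcW('WWWWWWxWW'): A returns 1, B raises IndexError
import Mathlib
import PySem

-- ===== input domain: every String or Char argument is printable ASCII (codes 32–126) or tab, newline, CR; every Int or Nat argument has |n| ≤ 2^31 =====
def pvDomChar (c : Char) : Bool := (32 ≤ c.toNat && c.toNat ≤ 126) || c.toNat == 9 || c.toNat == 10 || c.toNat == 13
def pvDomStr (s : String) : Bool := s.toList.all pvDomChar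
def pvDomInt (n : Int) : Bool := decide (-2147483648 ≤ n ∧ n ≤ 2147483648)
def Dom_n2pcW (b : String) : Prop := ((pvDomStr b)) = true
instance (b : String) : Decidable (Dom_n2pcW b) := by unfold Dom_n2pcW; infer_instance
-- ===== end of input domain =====

-- B replaces A's 18-branch closeMill dispatch and per-cell board rebuild by one precomputed
-- mill-partner table looked up per empty cell (objective: simpler).

-- ===== PORT A =====
-- b[j] on a Nat index; an out-of-range access is a Python IndexError, excluded by Pre_n2pcW
def pyAt (b : List Char) (j : Nat) : Char := b.getD j ' '

def closeMill (j : Nat) (b : List Char) : Bool :=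
  let c := pyAt b j
  if c == 'W' || c == 'B' then
    if j = 0 then pyAt b 2 == c && pyAt b 4 == c
    else if j = 1 then (pyAt b 3 == c && pyAt b 5 == c) || (pyAt b 8 == c && pyAt b 17 == c)
    else if j = 2 then pyAt b 4 == c && pyAt b 0 == c
    else if j = 3 then (pyAt b 1 == c && pyAt b 5 == c) || (pyAt b 7 == c && pyAt b 14 == c)
    else if j = 4 then pyAt b 2 == c && pyAt b 0 == c
    else if j = 5 then (pyAt b 1 == c && pyAt b 3 == c) || (pyAt b 6 == c && pyAt b 11 == c)
    else if j = 6 then (pyAt b 7 == c && pyAt b 8 == c) || (pyAt b 5 == c && pyAt b 11 == c)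
    else if j = 7 then (pyAt b 6 == c && pyAt b 8 == c) || (pyAt b 3 == c && pyAt b 14 == c)
    else if j = 8 then (pyAt b 6 == c && pyAt b 7 == c) || (pyAt b 1 == c && pyAt b 17 == c)
    else if j = 9 then (pyAt b 12 == c && pyAt b 15 == c) || (pyAt b 10 == c && pyAt b 11 == c)
    else if j = 10 then (pyAt b 13 == c && pyAt b 16 == c) || (pyAt b 9 == c && pyAt b 11 == c)
    else if j = 11 then (pyAt b 14 == c && pyAt b 17 == c) || (pyAt b 9 == c && pyAt b 10 == c) || (pyAt b 5 == c && pyAt b 6 == c)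
    else if j = 12 then (pyAt b 9 == c && pyAt b 15 == c) || (pyAt b 13 == c && pyAt b 14 == c)
    else if j = 13 then (pyAt b 10 == c && pyAt b 16 == c) || (pyAt b 12 == c && pyAt b 14 == c)
    else if j = 14 then (pyAt b 11 == c && pyAt b 17 == c) || (pyAt b 13 == c && pyAt b 12 == c) || (pyAt b 3 == c && pyAt b 7 == c)
    else if j = 15 then (pyAt b 12 == c && pyAt b 9 == c) || (pyAt b 16 == c && pyAt b 17 == c)
    else if j = 16 then (pyAt b 10 == c && pyAt b 13 == c) || (pyAt b 15 == c && pyAt b 17 == c)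
    else if j = 17 then (pyAt b 11 == c && pyAt b 14 == c) || (pyAt b 15 == c && pyAt b 16 == c) || (pyAt b 1 == c && pyAt b 8 == c)
    else false  -- Python falls off the end of closeMill returning None, which is falsy in n2pcW's `if`
  else false

def n2pcW (b : String) : Int :=
  (List.range b.toList.length).foldl
    (fun cnt i =>
      if pyAt b.toList i == 'x' then
        -- b1=b; temp=list(b1); temp[i]='W'; b1="".join(temp)  (kept as a char list)
        if closeMill i (b.toList.set i 'W') then cnt + 1 else cnt
      else cnt) 0

-- ===== PORT B =====
def MILLS : List (Nat × Nat × Nat) :=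
  [(0,2,4),(1,3,5),(1,8,17),(3,7,14),(5,6,11),(6,7,8),(9,12,15),(9,10,11),(10,13,16),(12,13,14),(11,14,17),(15,16,17)]

-- OTHERS.setdefault(k, []).append(pr)  is  d[k] = d.get(k, []) + [pr], i.e. Dict.modify k [] (· ++ [pr])
def OTHERS : PySem.Dict Nat (List (Nat × Nat)) :=
  MILLS.foldl
    (fun d t =>
      ((d.modify t.1 [] (fun l => l ++ [(t.2.1, t.2.2)])).modify t.2.1 [] (fun l => l ++ [(t.1, t.2.2)])).modify t.2.2 [] (fun l => l ++ [(t.1, t.2.1)]))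
    PySem.Dict.empty

def n2pcW_alt (b : String) : Int :=
  (List.range b.toList.length).foldl
    (fun cnt i =>
      if b.toList.getD i ' ' == 'x'
          && (OTHERS.getD i []).any (fun pq => b.toList.getD pq.1 ' ' == 'W' && b.toList.getD pq.2 ' ' == 'W')
      then cnt + 1 else cnt) 0

-- ===== PRECONDITION & SPEC =====
-- Pre_ excludes boards shorter than 18 positions that contain an empty cell: there A's (and B's)
-- out-of-range reads raise IndexError except when short-circuit evaluation happens to stop early,
-- and the two programs probe mill partners in different orders, so one may raise where the other returns.
def Pre_n2pcW (b : String) : Prop := 'x' ∈ b.toList → 18 ≤ b.toList.length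
instance (b : String) : Decidable (Pre_n2pcW b) := by unfold Pre_n2pcW; infer_instance
def pvWitness_n2pcW : String := "xWWBxxWBxWxBWxxBWx"

def Spec_n2pcW (b : String) (out : Int) : Prop := out = n2pcW_alt b
instance (b : String) (out : Int) : Decidable (Spec_n2pcW b out) := by unfold Spec_n2pcW; infer_instance

-- ===== CLAIM (what is proved, stated in full; the proofs are below) =====
def Claim_equal_n2pcW : Prop := ∀ (b : String), Dom_n2pcW b → Pre_n2pcW b → Spec_n2pcW b (n2pcW b)

-- ===== LEMMAS AND PROOFS =====
set_option maxRecDepth 8192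

theorem others0 : OTHERS.getD 0 [] = [(2,4)] := by rfl
theorem others1 : OTHERS.getD 1 [] = [(3,5),(8,17)] := by rfl
theorem others2 : OTHERS.getD 2 [] = [(0,4)] := by rfl
theorem others3 : OTHERS.getD 3 [] = [(1,5),(7,14)] := by rfl
theorem others4 : OTHERS.getD 4 [] = [(0,2)] := by rfl
theorem others5 : OTHERS.getD 5 [] = [(1,3),(6,11)] := by rfl
theorem others6 : OTHERS.getD 6 [] = [(5,11),(7,8)] := by rfl
theorem others7 : OTHERS.getD 7 [] = [(3,14),(6,8)] := by rfl
theorem others8 : OTHERS.getD 8 [] = [(1,17),(6,7)] := by rfl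
theorem others9 : OTHERS.getD 9 [] = [(12,15),(10,11)] := by rfl
theorem others10 : OTHERS.getD 10 [] = [(9,11),(13,16)] := by rfl
theorem others11 : OTHERS.getD 11 [] = [(5,6),(9,10),(14,17)] := by rfl
theorem others12 : OTHERS.getD 12 [] = [(9,15),(13,14)] := by rfl
theorem others13 : OTHERS.getD 13 [] = [(10,16),(12,14)] := by rfl
theorem others14 : OTHERS.getD 14 [] = [(3,7),(12,13),(11,17)] := by rfl
theorem others15 : OTHERS.getD 15 [] = [(9,12),(16,17)] := by rfl
theorem others16 : OTHERS.getD 16 [] = [(10,13),(15,17)] := by rfl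
theorem others17 : OTHERS.getD 17 [] = [(1,8),(11,14),(15,16)] := by rfl

theorem pyAt_set18 (b : List Char) (hlen : 18 ≤ b.length) (j p : Nat) (hj : j < 18) :
    (b.set j 'W')[p]?.getD ' ' = if p = j then 'W' else b[p]?.getD ' ' := by
  rcases eq_or_ne p j with rfl | h
  · simp [show p < b.length by omega]
  · simp [List.getElem?_set_ne (by omega : j ≠ p), h]

theorem others_getD_ge (i : Nat) (h : 18 ≤ i) : OTHERS.getD i [] = [] := by
  have hc : OTHERS.contains i = false := by
    rw [PySem.Dict.contains_eq_decide_mem_keys]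
    have hk : OTHERS.keys = [0, 2, 4, 1, 3, 5, 8, 17, 7, 14, 6, 11, 9, 12, 15, 10, 13, 16] := by rfl
    simp [hk]; omega
  exact PySem.Dict.getD_of_not_contains OTHERS [] hc

theorem closeMill_ge (j : Nat) (b : List Char) (h : 18 ≤ j) : closeMill j b = false := by
  unfold closeMill
  simp only [show j ≠ 0 by omega, show j ≠ 1 by omega, show j ≠ 2 by omega, show j ≠ 3 by omega,
    show j ≠ 4 by omega, show j ≠ 5 by omega, show j ≠ 6 by omega, show j ≠ 7 by omega,
    show j ≠ 8 by omega, show j ≠ 9 by omega, show j ≠ 10 by omega, show j ≠ 11 by omega,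
    show j ≠ 12 by omega, show j ≠ 13 by omega, show j ≠ 14 by omega, show j ≠ 15 by omega,
    show j ≠ 16 by omega, show j ≠ 17 by omega, if_false, ite_self]

-- per empty cell, A's closeMill dispatch on the board with 'W' placed equals B's mill-partner check
theorem key_lemma (b : List Char) (hlen : 18 ≤ b.length) (i : Nat) (hi : i < b.length) :
    closeMill i (b.set i 'W')
      = (OTHERS.getD i []).any (fun pq => b.getD pq.1 ' ' == 'W' && b.getD pq.2 ' ' == 'W') := by
  by_cases h18 : i < 18
  · interval_cases i <;>
    · simp [closeMill, pyAt_set18 b hlen, others0, others1, others2, others3, others4, others5, others6, others7, others8, others9, others10, others11, others12, others13, others14, others15, others16, others17, pyAt]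
      try (rw [Bool.eq_iff_iff]; simp; tauto)
  · rw [closeMill_ge i (b.set i 'W') (by omega), others_getD_ge i (by omega)]
    rfl

-- ===== VERDICT (by name: the statement is the Claim_ definition above) =====
theorem n2pcW_spec : Claim_equal_n2pcW := by
  unfold Claim_equal_n2pcW Spec_n2pcW
  intro b _ hPre
  unfold n2pcW n2pcW_alt
  apply PySem.List.foldl_congr_mem
  intro cnt i hi
  rw [List.mem_range] at hi
  by_cases hx : b.toList.getD i ' ' = 'x'
  · have hlen : 18 ≤ b.toList.length := by
      apply hPre
      have hg := List.getD_eq_getElem b.toList ' ' hi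
      rw [hx] at hg; rw [hg]; exact List.getElem_mem hi
    have hx' : b.toList[i]?.getD ' ' = 'x' := by simpa [List.getD] using hx
    rw [key_lemma b.toList hlen i hi]
    simp [pyAt, List.getD]
    split_ifs <;> simp_all
    rename_i hall hex
    obtain ⟨p, q, hm, hp, hq⟩ := hex
    exact hall p q hm hp hq
  · have hx' : ¬ b.toList[i]?.getD ' ' = 'x' := by simpa [List.getD] using hx
    simp [pyAt, List.getD, hx']
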